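-- pv_equiv track=rewrite | github.com/yofn/pyacm | bnu/team_201003/e.py | f
-- ===== SOURCE A (Python) =====
-- def f(l):
--     c2i = lambda c: ord(c)-ord('a')
--     p   = 11092019
--     cl  = [1]*26 # 1 for not having this c;
--     l   = list(map(c2i,l))
--     for i in l:
--         cl[i] += 1
--     c   = 1
--     for i in cl:
--         c *= i
--         if c>p:
--             c=c%p
--     return c
-- ===== SOURCE B (Python) =====
-- def f(l):
--     # sort the letter codes, collapse adjacent runs, and add each run's length
--     # to its histogram slot in one write; then A's exact product-reduction loop
--     p = 11092019
--     codes = sorted(ord(ch) - 97 for ch in l)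
--     cl = [1] * 26
--     while codes:
--         x = codes[0]
--         run = 1
--         while run < len(codes) and codes[run] == x:
--             run += 1
--         cl[x] += run
--         codes = codes[run:]
--     c = 1
--     for v in cl:
--         c *= v
--         if c > p:
--             c %= p
--     return c
-- ===== Notes on version B (the rewrite author's own statement) =====
-- stated objective: alternative
-- what changed: Replaces A's per-character histogram increments with sorting the letter codes and collapsing adjacent runs, writing each run's length into its histogram slot once; the product-reduction loop is kept, so the return value matches A exactly (including the negative-index wraparound for codes 71..96 and the IndexError outside 71..122).
import Mathlib
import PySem

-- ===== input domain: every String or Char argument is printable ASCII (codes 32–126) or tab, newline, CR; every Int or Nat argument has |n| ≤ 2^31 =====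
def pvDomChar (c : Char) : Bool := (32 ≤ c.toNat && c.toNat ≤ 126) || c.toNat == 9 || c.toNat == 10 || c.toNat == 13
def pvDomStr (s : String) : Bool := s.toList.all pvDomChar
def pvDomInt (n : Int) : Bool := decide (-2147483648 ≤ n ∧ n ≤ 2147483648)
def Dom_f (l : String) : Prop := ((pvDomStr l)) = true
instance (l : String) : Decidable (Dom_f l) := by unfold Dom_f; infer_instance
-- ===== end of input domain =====

-- B sorts the letter codes and collapses adjacent runs into single histogram writes
-- instead of A's per-character increments; same product-reduction loop, same value.

-- ===== PORT A =====
-- the shared loop body 'c *= i; if c > p: c %= p' (identical in both Python sources)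
def pvStep (c i : Int) : Int :=
  let c1 := c * i
  if c1 > 11092019 then PySem.Int.mod c1 11092019 else c1

-- 'cl[i] += 1' with Python indexing: read cl[i], write it back incremented (none = IndexError)
def pvBump (acc : Option (List Int)) (i : Int) : Option (List Int) :=
  acc.bind (fun cl => (PySem.List.pyGet? cl i).bind (fun v => PySem.List.pySet? cl i (v + 1)))

def f (l : String) : Int :=
  match (l.toList.map (fun ch => (ch.toNat : Int) - 97)).foldl pvBump
      (some (List.replicate 26 (1 : Int))) with
  | some cl => cl.foldl pvStep 1
  | none => 0   -- unreachable inside Pre_f: the Python raises IndexError exactly there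

-- ===== PORT B =====
-- the 'while codes: … cl[x] += run; codes = codes[run:]' loop of Source B: one histogram
-- write per run of equal codes, with Python's indexing (none = IndexError)
def pvRunsAdd (acc : Option (List Int)) : List Int → Option (List Int)
  | [] => acc
  | x :: xs =>
    let run := (xs.takeWhile (fun y => y == x)).length + 1
    pvRunsAdd (acc.bind (fun cl =>
        (PySem.List.pyGet? cl x).bind (fun v => PySem.List.pySet? cl x (v + (run : Int)))))
      (xs.dropWhile (fun y => y == x))
  termination_by s => s.length
  decreasing_by
    simpa using Nat.lt_succ_of_le (List.length_dropWhile_le _ xs)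

def f_alt (l : String) : Int :=
  match pvRunsAdd (some (List.replicate 26 (1 : Int)))
      (PySem.List.sorted (l.toList.map (fun ch => (ch.toNat : Int) - 97)) (fun x => x) false) with
  | some cl => cl.foldl pvStep 1
  | none => 0   -- unreachable inside Pre_f: the Python raises IndexError exactly there

-- ===== PRECONDITION & SPEC =====
-- Pre_f admits exactly the inputs on which the Python A returns: every character's code in
-- [71,122] ('G'..'z'); on any other character cl[ord(c)-ord('a')] raises IndexError.
def Pre_f (l : String) : Prop :=
  (l.toList.all (fun ch => 71 ≤ ch.toNat && ch.toNat ≤ 122)) = true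
instance (l : String) : Decidable (Pre_f l) := by unfold Pre_f; infer_instance
def pvWitness_f : String := "abc"

def Spec_f (l : String) (out : Int) : Prop := out = f_alt l
instance (l : String) (out : Int) : Decidable (Spec_f l out) := by unfold Spec_f; infer_instance

-- ===== CLAIM (what is proved, stated in full; the proofs are below) =====
def Claim_equal_f : Prop := ∀ (l : String), Dom_f l → Pre_f l → Spec_f l (f l)

-- ===== LEMMAS AND PROOFS =====

-- the list slot a Python index i ∈ [-26,26) addresses in a 26-element list
def pvIdx (i : Int) : Nat := if 0 ≤ i then i.toNat else 26 - (-i).toNat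

lemma pvIdx_lt {i : Int} (h0 : -26 ≤ i) (h1 : i < 26) : pvIdx i < 26 := by
  unfold pvIdx; split <;> omega

lemma pvGet (cl : List Int) (i : Int) (hlen : cl.length = 26) (h0 : -26 ≤ i) (h1 : i < 26) :
    PySem.List.pyGet? cl i = cl[pvIdx i]? := by
  unfold pvIdx
  by_cases hpos : 0 ≤ i
  · rw [if_pos hpos]
    exact PySem.List.pyGet?_of_nonneg cl hpos
  · rw [if_neg hpos]
    have hi : i = -(((-i).toNat : Nat) : Int) := by omega
    conv_lhs => rw [hi]
    rw [PySem.List.pyGet?_neg_natCast cl (-i).toNat (by omega) (by omega), hlen]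

lemma pvSet (cl : List Int) (i : Int) (v : Int) (hlen : cl.length = 26) (h0 : -26 ≤ i) (h1 : i < 26) :
    PySem.List.pySet? cl i v = some (cl.set (pvIdx i) v) := by
  unfold pvIdx
  simp only [PySem.List.pySet?, PySem.List.pyIdx?, hlen]
  by_cases hpos : 0 ≤ i
  · rw [if_pos hpos, if_pos (by exact_mod_cast h1), if_pos hpos]
    simp
  · rw [if_neg hpos, if_pos (by exact_mod_cast h0), if_neg hpos]
    simp

lemma pvGetD_set (cl : List Int) (n j : Nat) (hn : n < cl.length) (hj : j < cl.length) (k : Int) :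
    (cl.set n (cl.getD n 0 + k)).getD j 0 = cl.getD j 0 + if n = j then k else 0 := by
  simp only [List.getD_eq_getElem?_getD, List.getElem?_set]
  split_ifs with h1
  · subst h1
    rw [List.getElem?_eq_getElem hn]
    simp
  · simp

-- the 26-slot histogram a code list m adds on top of cl
def pvHist (m : List Int) (cl : List Int) : List Int :=
  (List.range 26).map (fun j => cl.getD j 0 + ((m.countP (fun x => pvIdx x == j)) : Int))

lemma pvHist_nil {cl : List Int} (hlen : cl.length = 26) : pvHist [] cl = cl := by
  unfold pvHist
  apply List.ext_getElem (by simp [hlen])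
  intro j h1 h2
  simp [List.getD_eq_getElem?_getD, List.getElem?_eq_getElem (by omega : j < cl.length),
    List.countP_nil]

lemma pvHist_set {cl : List Int} (hlen : cl.length = 26) {i : Int} (h0 : -26 ≤ i) (h1 : i < 26)
    (m : List Int) (k : Int) :
    pvHist m (cl.set (pvIdx i) (cl.getD (pvIdx i) 0 + k)) =
      (List.range 26).map (fun j =>
        cl.getD j 0 + (if pvIdx i = j then k else 0) + ((m.countP (fun x => pvIdx x == j)) : Int)) := by
  unfold pvHist
  apply List.map_congr_left
  intro j hj
  have hj26 : j < 26 := List.mem_range.mp hj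
  rw [pvGetD_set cl (pvIdx i) j (by rw [hlen]; exact pvIdx_lt h0 h1) (by omega) k]

-- the increment of one code in [-26,26): never raises, adds k at slot pvIdx i
lemma pvWrite {cl : List Int} (hlen : cl.length = 26) {i : Int} (h0 : -26 ≤ i) (h1 : i < 26)
    (k : Int) :
    (PySem.List.pyGet? cl i).bind (fun v => PySem.List.pySet? cl i (v + k)) =
      some (cl.set (pvIdx i) (cl.getD (pvIdx i) 0 + k)) := by
  have hlt : pvIdx i < cl.length := by rw [hlen]; exact pvIdx_lt h0 h1
  rw [pvGet cl i hlen h0 h1, List.getElem?_eq_getElem hlt]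
  simp only [Option.bind_some]
  rw [pvSet cl i _ hlen h0 h1, List.getD_eq_getElem _ _ hlt]

-- A's counting loop: with every code in [-26,26) it never raises and produces,
-- slot by slot, the initial slot value plus the number of codes addressing that slot
lemma pvFoldA : ∀ (m : List Int) (cl : List Int), cl.length = 26 →
    (∀ i ∈ m, -26 ≤ i ∧ i < 26) →
    m.foldl pvBump (some cl) = some (pvHist m cl) := by
  intro m
  induction m with
  | nil =>
    intro cl hlen _
    simp only [List.foldl_nil]
    rw [pvHist_nil hlen]
  | cons i m ih =>
    intro cl hlen hm
    have hi := hm i (by simp)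
    have hbump : pvBump (some cl) i = some (cl.set (pvIdx i) (cl.getD (pvIdx i) 0 + 1)) := by
      unfold pvBump
      simp only [Option.bind_some]
      exact pvWrite hlen hi.1 hi.2 1
    rw [List.foldl_cons, hbump,
      ih _ (by simp [hlen]) (fun x hx => hm x (by simp [hx]))]
    congr 1
    rw [pvHist_set hlen hi.1 hi.2 m 1]
    unfold pvHist
    apply List.map_congr_left
    intro j hj
    rw [List.countP_cons]
    by_cases hij : pvIdx i = j
    · rw [if_pos hij, if_pos (by simp [hij])]
      push_cast
      ring
    · rw [if_neg hij, if_neg (by simp [hij])]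
      push_cast
      ring

-- B's run loop: same histogram, one write of the whole run length per run
lemma pvRunsAddAux : ∀ (n : Nat) (m : List Int), m.length ≤ n → ∀ (cl : List Int),
    cl.length = 26 → (∀ i ∈ m, -26 ≤ i ∧ i < 26) →
    pvRunsAdd (some cl) m = some (pvHist m cl) := by
  intro n
  induction n with
  | zero =>
    intro m hmn cl hlen _
    have hnil : m = [] := List.eq_nil_of_length_eq_zero (by omega)
    subst hnil
    rw [pvRunsAdd, pvHist_nil hlen]
  | succ n ih =>
    intro m hmn cl hlen hall
    rcases m with _ | ⟨x, xs⟩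
    · rw [pvRunsAdd, pvHist_nil hlen]
    have hx := hall x (by simp)
    rw [pvRunsAdd]
    set t := xs.takeWhile (fun y => y == x) with ht
    set d := xs.dropWhile (fun y => y == x) with hd
    simp only [Option.bind_some]
    rw [pvWrite hlen hx.1 hx.2 ((t.length + 1 : Nat) : Int)]
    have hdsub : d.Sublist xs := List.dropWhile_sublist _
    have hdlen : d.length ≤ n := le_trans (List.length_dropWhile_le _ xs) (by simpa using hmn)
    rw [ih d hdlen _ (by simp [hlen])
      (fun y hy => hall y (List.mem_cons_of_mem _ (hdsub.mem hy)))]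
    congr 1
    rw [pvHist_set hlen hx.1 hx.2 d ((t.length + 1 : Nat) : Int)]
    unfold pvHist
    apply List.map_congr_left
    intro j hj
    -- countP over x :: xs = (contribution of the leading run x :: t) + countP over d
    have hsplit : x :: xs = (x :: t) ++ d := by
      rw [List.cons_append]
      congr 1
      exact ht ▸ hd ▸ (List.takeWhile_append_dropWhile).symm
    have hall' : ∀ y ∈ x :: t, pvIdx y = pvIdx x := by
      intro y hy
      rcases List.mem_cons.mp hy with rfl | hy'
      · rfl
      · have := List.mem_takeWhile_imp (ht ▸ hy')
        simp only [beq_iff_eq] at this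
        rw [this]
    have hrunC : ((x :: t).countP (fun y => pvIdx y == j)) =
        if pvIdx x = j then t.length + 1 else 0 := by
      by_cases hij : pvIdx x = j
      · rw [if_pos hij]
        have : (x :: t).countP (fun y => pvIdx y == j) = (x :: t).length := by
          apply List.countP_eq_length.mpr
          intro y hy
          simp [hall' y hy, hij]
        rw [this]
        simp
      · rw [if_neg hij]
        apply List.countP_eq_zero.mpr
        intro y hy
        simp [hall' y hy, hij]
    rw [hsplit, List.countP_append, hrunC]
    by_cases hij : pvIdx x = j
    · rw [if_pos hij, if_pos hij]
      push_cast
      ring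
    · rw [if_neg hij, if_neg hij]
      push_cast
      ring

lemma pvRunsAddEq (m : List Int) (cl : List Int) (hlen : cl.length = 26)
    (hall : ∀ i ∈ m, -26 ≤ i ∧ i < 26) :
    pvRunsAdd (some cl) m = some (pvHist m cl) :=
  pvRunsAddAux m.length m le_rfl cl hlen hall

-- ===== VERDICT (by name: the statement is the Claim_ definition above) =====
theorem f_spec : Claim_equal_f := by
  intro l _ hPre
  unfold Spec_f
  set m := l.toList.map (fun ch => (ch.toNat : Int) - 97) with hmdef
  have hm : ∀ i ∈ m, -26 ≤ i ∧ i < 26 := by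
    intro i hi
    rcases List.mem_map.mp hi with ⟨ch, hch, rfl⟩
    have h1 := List.all_eq_true.mp hPre ch hch
    simp only [Bool.and_eq_true, decide_eq_true_eq] at h1
    omega
  set s := PySem.List.sorted m (fun x => x) false with hs
  have hperm : s.Perm m := PySem.List.sorted_perm m (fun x => x) false
  have hsm : ∀ i ∈ s, -26 ≤ i ∧ i < 26 := fun i hi => hm i (hperm.mem_iff.mp hi)
  have hA : f l = (pvHist m (List.replicate 26 (1 : Int))).foldl pvStep 1 := by
    unfold f
    rw [← hmdef, pvFoldA m (List.replicate 26 (1 : Int)) (by simp) hm]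
  have hB : f_alt l = (pvHist s (List.replicate 26 (1 : Int))).foldl pvStep 1 := by
    unfold f_alt
    rw [← hmdef, ← hs, pvRunsAddEq s (List.replicate 26 (1 : Int)) (by simp) hsm]
  have hHist : pvHist s (List.replicate 26 (1 : Int)) = pvHist m (List.replicate 26 (1 : Int)) := by
    unfold pvHist
    apply List.map_congr_left
    intro j _
    rw [hperm.countP_eq]
  rw [hA, hB, hHist]
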